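-- pv_equiv track=rewrite | github.com/jmoggridge/bioinfo-notebooks | BA6_D - 2-break sorting (solved).py | getBlackEdges
-- ===== SOURCE A (Python) =====
-- def Chromosome_to_Cycle(Chromosome):
--
--     Nodes =[False for _ in range(len(Chromosome)*2)]
--     for j in range(1,len(Chromosome)+1):
--         if Chromosome[j-1] > 0:
--             Nodes[2*j-2] = 2*Chromosome[j-1] - 1
--             Nodes[2*j-1] = 2*Chromosome[j-1]
--         else:
--             Nodes[2*j-2] = -2*Chromosome[j-1]
--             Nodes[2*j-1] = -2*Chromosome[j-1] - 1
--     return Nodes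
--
-- def getBlackEdges(genome):
--
--     nodes= []
--     for chromosome in genome:
--         nodes = nodes + Chromosome_to_Cycle(chromosome)
--     black_edges = []
--     while nodes:
--         black_edges.append((nodes.pop(0), nodes.pop(0), 'black'))
--
--     return black_edges
-- ===== SOURCE B (Python) =====
-- def getBlackEdges(genome):
--     # Compute each black edge directly from its gene: no node table, no popping.
--     return [(2 * g - 1, 2 * g, 'black') if g > 0 else (-2 * g, -2 * g - 1, 'black')
--             for chromosome in genome for g in chromosome]
-- ===== Notes on version B (the rewrite author's own statement) =====
-- stated objective: simpler
-- what changed: Replaces the two-phase algorithm (build a node table per chromosome via indexed assignment, concatenate, then pair nodes off by popping from the front) with a single comprehension that computes each black edge directly from its gene, eliminating the Chromosome_to_Cycle helper and the intermediate nodes list.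
import Mathlib
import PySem

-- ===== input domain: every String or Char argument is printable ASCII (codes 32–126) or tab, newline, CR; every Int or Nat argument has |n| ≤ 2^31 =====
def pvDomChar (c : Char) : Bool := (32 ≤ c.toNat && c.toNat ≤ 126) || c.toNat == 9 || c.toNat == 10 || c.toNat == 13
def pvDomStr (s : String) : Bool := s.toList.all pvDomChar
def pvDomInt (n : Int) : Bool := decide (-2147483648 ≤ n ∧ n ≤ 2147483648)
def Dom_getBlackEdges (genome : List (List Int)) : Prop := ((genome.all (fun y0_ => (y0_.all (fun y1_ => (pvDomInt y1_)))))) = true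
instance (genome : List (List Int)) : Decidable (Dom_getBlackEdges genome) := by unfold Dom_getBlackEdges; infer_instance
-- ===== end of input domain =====

-- B computes each black edge directly from its gene in one pass, dropping A's node table and front-popping pairing (simpler).

-- ===== PORT A =====
-- Python inits Nodes with False placeholders; every slot is overwritten by the loop, so 0 is used as the placeholder here.
def Chromosome_to_Cycle (Chromosome : List Int) : List Int :=
  (PySem.List.pyRange 1 ((Chromosome.length : Int) + 1) 1).foldl
    (fun Nodes j =>
      let g := PySem.List.pyGetD Chromosome (j - 1) 0   -- Chromosome[j-1]; j-1 is always in range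
      if g > 0 then
        (Nodes.set (2*j-2).toNat (2*g - 1)).set (2*j-1).toNat (2*g)
      else
        (Nodes.set (2*j-2).toNat (-2*g)).set (2*j-1).toNat (-2*g - 1))
    (List.replicate (Chromosome.length * 2) (0 : Int))

-- while nodes: pop two from the front; the list built from cycles always has even length,
-- so the IndexError branch of Python's pop(0) is never reached.
def pairOff : List Int → List (Int × Int × String)
  | a :: b :: rest => (a, b, "black") :: pairOff rest
  | _ => []

def getBlackEdges (genome : List (List Int)) : List (Int × Int × String) :=
  let nodes := genome.foldl (fun nodes chromosome => nodes ++ Chromosome_to_Cycle chromosome) []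
  pairOff nodes

-- ===== PORT B =====
def getBlackEdges_alt (genome : List (List Int)) : List (Int × Int × String) :=
  genome.flatMap (fun chromosome =>
    chromosome.map (fun g =>
      if g > 0 then (2*g - 1, 2*g, "black") else (-2*g, -2*g - 1, "black")))

-- ===== PRECONDITION & SPEC =====
def Spec_getBlackEdges (genome : List (List Int)) (out : List (Int × Int × String)) : Prop := out = getBlackEdges_alt genome
instance (genome : List (List Int)) (out : List (Int × Int × String)) : Decidable (Spec_getBlackEdges genome out) := by unfold Spec_getBlackEdges; infer_instance

-- ===== CLAIM (what is proved, stated in full; the proofs are below) =====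
def Claim_equal_getBlackEdges : Prop := ∀ (genome : List (List Int)), Dom_getBlackEdges genome → Spec_getBlackEdges genome (getBlackEdges genome)

-- ===== LEMMAS AND PROOFS =====

def nodePair (g : Int) : List Int :=
  if g > 0 then [2*g - 1, 2*g] else [-2*g, -2*g - 1]

theorem len_flat (l : List Int) : (l.flatMap nodePair).length = 2 * l.length := by
  induction l with
  | nil => simp
  | cons g l ih => by_cases h : g > 0 <;> simp [nodePair, h, ih] <;> omega

-- the inner loop, after m iterations, has written the first 2m slots
theorem cycle_aux (xs : List Int) (m : Nat) (hm : m ≤ xs.length) :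
    (PySem.List.pyRange 1 ((m : Int) + 1) 1).foldl
      (fun Nodes j =>
        let g := PySem.List.pyGetD xs (j - 1) 0
        if g > 0 then
          (Nodes.set (2*j-2).toNat (2*g - 1)).set (2*j-1).toNat (2*g)
        else
          (Nodes.set (2*j-2).toNat (-2*g)).set (2*j-1).toNat (-2*g - 1))
      (List.replicate (xs.length * 2) (0 : Int))
    = (xs.take m).flatMap nodePair ++ List.replicate (xs.length * 2 - 2 * m) (0 : Int) := by
  induction m with
  | zero => simp [PySem.List.pyRange_one_eq_nil]
  | succ m ih =>
    have hlt : m < xs.length := by omega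
    have hcast : ((m + 1 : Nat) : Int) + 1 = ((m : Int) + 1) + 1 := by push_cast; ring
    have hsplit : PySem.List.pyRange 1 (((m : Int) + 1) + 1) 1
        = PySem.List.pyRange 1 ((m : Int) + 1) 1 ++ [((m : Int) + 1)] := by
      simpa using PySem.List.pyRange_one_succ_right (a := 1) (b := (m : Int) + 1) (by omega)
    rw [hcast, hsplit, List.foldl_append, ih (le_of_lt hlt)]
    have hlen : ((xs.take m).flatMap nodePair).length = 2 * m := by
      rw [len_flat]
      simp [List.length_take, Nat.min_eq_left (le_of_lt hlt)]
    have hrep : List.replicate (xs.length * 2 - 2 * m) (0 : Int)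
        = 0 :: 0 :: List.replicate (xs.length * 2 - 2 * (m + 1)) 0 := by
      rw [show xs.length * 2 - 2 * m = ((xs.length * 2 - 2 * (m + 1)) + 1) + 1 by omega]
      simp [List.replicate_succ]
    have hg : PySem.List.pyGetD xs (((m : Int) + 1) - 1) 0 = xs[m] := by
      rw [show ((m : Int) + 1) - 1 = (m : Int) by ring]
      simp [PySem.List.pyGetD, PySem.List.pyGet?, PySem.List.pyIdx?, hlt]
    have hidx1 : (2 * ((m : Int) + 1) - 2).toNat = 2 * m := by omega
    have hidx2 : (2 * ((m : Int) + 1) - 1).toNat = 2 * m + 1 := by omega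
    rw [List.take_succ_eq_append_getElem hlt, List.flatMap_append]
    simp only [List.foldl_cons, List.foldl_nil, hg, hrep, hidx1, hidx2]
    by_cases hpos : xs[m] > 0 <;>
      simp [hpos, hlen, nodePair]

theorem cycle_eq (xs : List Int) : Chromosome_to_Cycle xs = xs.flatMap nodePair := by
  have h := cycle_aux xs xs.length le_rfl
  rw [Chromosome_to_Cycle]
  rw [h, show xs.length * 2 - 2 * xs.length = 0 by omega]
  simp

theorem pairOff_flatMap (c : List Int) (rest : List Int) :
    pairOff (c.flatMap nodePair ++ rest)
      = c.map (fun g => if g > 0 then (2*g - 1, 2*g, "black") else (-2*g, -2*g - 1, "black"))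
        ++ pairOff rest := by
  induction c with
  | nil => simp
  | cons g c ih =>
    by_cases h : g > 0 <;> simp [nodePair, h, pairOff, ih]

theorem foldl_nodes (genome : List (List Int)) (acc : List Int) :
    genome.foldl (fun nodes chromosome => nodes ++ Chromosome_to_Cycle chromosome) acc
      = acc ++ genome.flatMap (fun c => c.flatMap nodePair) := by
  induction genome generalizing acc with
  | nil => simp
  | cons c genome ih => simp [cycle_eq, List.append_assoc, List.flatMap_def]

-- ===== VERDICT (by name: the statement is the Claim_ definition above) =====
theorem getBlackEdges_spec : Claim_equal_getBlackEdges := by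
  intro genome hD
  clear hD
  show getBlackEdges genome = getBlackEdges_alt genome
  rw [getBlackEdges, foldl_nodes]
  simp only [List.nil_append, getBlackEdges_alt]
  induction genome with
  | nil => rfl
  | cons c genome ih => simp [pairOff_flatMap, ih]
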